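-- pv_equiv track=rewrite | github.com/Synergyscape-V1/skeldir-2.0 | backend/app/tasks/attribution.py | _split_revenue_cents_evenly
-- ===== SOURCE A (Python) =====
-- def _split_revenue_cents_evenly(revenue_cents: int, parts: int) -> list[int]:
--     if parts < 1:
--         raise ValueError("parts must be >= 1")
--     if revenue_cents < 0:
--         raise ValueError("revenue_cents must be >= 0")
--     base = revenue_cents // parts
--     remainder = revenue_cents % parts
--     return [base + (1 if i < remainder else 0) for i in range(parts)]
-- ===== SOURCE B (Python) =====
-- def _split_revenue_cents_evenly(revenue_cents: int, parts: int) -> list[int]: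
--     if parts < 1:
--         raise ValueError("parts must be >= 1")
--     if revenue_cents < 0:
--         raise ValueError("revenue_cents must be >= 0")
--     shares = []
--     remaining = revenue_cents
--     for k in range(parts, 0, -1):
--         share = -(-remaining // k)  # ceil(remaining / k): fair share for the next slot
--         shares.append(share)
--         remaining -= share
--     return shares
-- ===== Notes on version B (the rewrite author's own statement) =====
-- stated objective: alternative
-- what changed: Replaces A's precomputed base/remainder and per-index i<remainder formula by a greedy running-state loop: for k = parts down to 1, allocate ceil(remaining/k) to the next slot and subtract it from the remaining pot; no base or remainder is ever computed.
import Mathlib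
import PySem

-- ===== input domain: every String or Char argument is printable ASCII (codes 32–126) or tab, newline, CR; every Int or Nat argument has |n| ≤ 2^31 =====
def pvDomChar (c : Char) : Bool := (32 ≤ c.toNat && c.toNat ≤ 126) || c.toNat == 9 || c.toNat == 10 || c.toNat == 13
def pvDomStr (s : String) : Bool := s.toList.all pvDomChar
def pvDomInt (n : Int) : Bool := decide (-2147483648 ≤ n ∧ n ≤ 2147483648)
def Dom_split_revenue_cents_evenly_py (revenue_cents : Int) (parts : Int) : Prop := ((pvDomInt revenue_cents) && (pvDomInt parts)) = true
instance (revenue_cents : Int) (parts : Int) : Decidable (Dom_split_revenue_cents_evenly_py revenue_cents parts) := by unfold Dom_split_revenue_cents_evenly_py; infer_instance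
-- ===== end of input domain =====

-- B replaces A's base/remainder closed-form by a greedy loop allocating ceil(remaining/k) for k = parts..1; objective: alternative decomposition.
-- Pre_ excludes exactly the inputs on which A raises ValueError (parts < 1 or revenue_cents < 0).

-- ===== PORT A =====
def split_revenue_cents_evenly_py (revenue_cents : Int) (parts : Int) : List Int :=
  if parts < 1 then []            -- Python: raise ValueError (excluded by Pre_)
  else if revenue_cents < 0 then []  -- Python: raise ValueError (excluded by Pre_)
  else
    let base := PySem.Int.floordiv revenue_cents parts
    let remainder := PySem.Int.mod revenue_cents parts
    (PySem.List.pyRange 0 parts 1).map (fun i => base + (if i < remainder then 1 else 0))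

-- ===== PORT B =====
-- the loop `for k in range(parts, 0, -1)` as structural recursion on k, carrying (shares, remaining)
def pvGreedy (remaining : Int) (k : Int) (shares : List Int) : List Int :=
  if h : k ≤ 0 then shares
  else
    let share := -(PySem.Int.floordiv (-remaining) k)   -- Python: -(-remaining // k)
    pvGreedy (remaining - share) (k - 1) (shares ++ [share])
termination_by k.toNat
decreasing_by omega

def split_revenue_cents_evenly_py_alt (revenue_cents : Int) (parts : Int) : List Int :=
  if parts < 1 then []            -- Python: raise ValueError (excluded by Pre_)
  else if revenue_cents < 0 then []  -- Python: raise ValueError (excluded by Pre_)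
  else pvGreedy revenue_cents parts []

-- ===== PRECONDITION & SPEC =====
def Pre_split_revenue_cents_evenly_py (revenue_cents : Int) (parts : Int) : Prop :=
  1 ≤ parts ∧ 0 ≤ revenue_cents
instance (revenue_cents : Int) (parts : Int) : Decidable (Pre_split_revenue_cents_evenly_py revenue_cents parts) := by unfold Pre_split_revenue_cents_evenly_py; infer_instance
def pvWitness_split_revenue_cents_evenly_py : Int × Int := (7, 3)

def Spec_split_revenue_cents_evenly_py (revenue_cents : Int) (parts : Int) (out : List Int) : Prop := out = split_revenue_cents_evenly_py_alt revenue_cents parts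
instance (revenue_cents : Int) (parts : Int) (out : List Int) : Decidable (Spec_split_revenue_cents_evenly_py revenue_cents parts out) := by unfold Spec_split_revenue_cents_evenly_py; infer_instance

-- ===== CLAIM =====
def Claim_equal_split_revenue_cents_evenly_py : Prop := ∀ (revenue_cents : Int) (parts : Int), Dom_split_revenue_cents_evenly_py revenue_cents parts → Pre_split_revenue_cents_evenly_py revenue_cents parts → Spec_split_revenue_cents_evenly_py revenue_cents parts (split_revenue_cents_evenly_py revenue_cents parts)

-- ===== LEMMAS AND PROOFS =====

-- A range-indexed 0/1 branch is two replicated blocks.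
theorem range_map_ite_split (r : Nat) (x y : Int) :
    ∀ n : Nat, r ≤ n →
      (List.range n).map (fun k => if k < r then x else y)
        = List.replicate r x ++ List.replicate (n - r) y := by
  intro n
  induction n with
  | zero => intro h; simp; omega
  | succ n ih =>
    intro h
    by_cases hr : r ≤ n
    · rw [List.range_succ, List.map_append, ih hr]
      have : ¬ n < r := by omega
      simp [this]
      rw [show n + 1 - r = (n - r) + 1 by omega, List.replicate_succ']
    · have hrn : r = n + 1 := by omega
      subst hrn
      simp only [Nat.sub_self, List.replicate_zero, List.append_nil]
      have : ∀ m : Nat, m ≤ n + 1 →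
          (List.range m).map (fun k => if k < n + 1 then x else y) = List.replicate m x := by
        intro m
        induction m with
        | zero => simp
        | succ m ih2 =>
          intro hm
          rw [List.range_succ, List.map_append, ih2 (by omega)]
          have hmn : m ≤ n := by omega
          simp [hmn, List.replicate_succ']
      exact this (n + 1) (le_refl _)

-- the greedy loop yields the two uniform blocks of the quotient/remainder decomposition
theorem pvGreedy_blocks :
    ∀ (n : Nat) (rc k b r : Int) (acc : List Int),
      k = (n : Int) → 1 ≤ k → 0 ≤ r → r < k → rc = k * b + r →
      pvGreedy rc k acc
        = acc ++ (List.replicate r.toNat (b + 1) ++ List.replicate (k - r).toNat b) := by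
  intro n
  induction n with
  | zero => intro rc k b r acc hk h1; omega
  | succ n ih =>
    intro rc k b r acc hk h1 hr0 hrk hrc
    rw [pvGreedy]
    have hk0 : ¬ k ≤ 0 := by omega
    simp only [hk0, dif_neg, not_false_iff]
    have hceil : -(PySem.Int.floordiv (-rc) k) = b + (if 0 < r then 1 else 0) := by
      rw [PySem.Int.neg_floordiv_neg_eq_iff_of_pos (by omega)]
      by_cases h : 0 < r <;> simp [h] <;> constructor <;> nlinarith
    rw [hceil]
    by_cases hn1 : n = 0
    · -- k = 1, so r = 0 and the loop body runs once more with share = b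
      subst hn1
      have hk1 : k = 1 := by exact_mod_cast hk
      have hr : r = 0 := by omega
      subst hr
      simp only [lt_irrefl, if_false, add_zero]
      rw [pvGreedy]
      simp [hk1]
    · have hk2 : (2 : Int) ≤ k := by omega
      by_cases h : 0 < r
      · -- share = b+1; remaining pot has quotient b, remainder r-1 over k-1 slots
        simp only [h, if_true]
        rw [ih (rc - (b + 1)) (k - 1) b (r - 1) (acc ++ [b + 1]) (by omega) (by omega)
            (by omega) (by omega) (by linarith)]
        rw [show r.toNat = (r - 1).toNat + 1 by omega,
            show (k - r).toNat = (k - 1 - (r - 1)).toNat by omega]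
        simp [List.replicate_succ]
      · -- r = 0: share = b; remaining pot has quotient b, remainder 0 over k-1 slots
        have hr : r = 0 := by omega
        subst hr
        simp only [lt_irrefl, if_false, add_zero]
        rw [ih (rc - b) (k - 1) b 0 (acc ++ [b]) (by omega) (by omega) le_rfl (by omega)
            (by linarith)]
        rw [show (k - 0).toNat = (k - 1 - 0).toNat + 1 by omega]
        simp [List.replicate_succ]

-- ===== VERDICT =====
theorem split_revenue_cents_evenly_py_spec : Claim_equal_split_revenue_cents_evenly_py := by
  intro rc parts _ hpre
  obtain ⟨hp, hr⟩ := hpre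
  unfold Spec_split_revenue_cents_evenly_py split_revenue_cents_evenly_py split_revenue_cents_evenly_py_alt
  have hp1 : ¬ parts < 1 := by omega
  have hr1 : ¬ rc < 0 := by omega
  simp only [hp1, hr1, if_false]
  have hdiv : PySem.Int.floordiv rc parts = rc / parts :=
    PySem.Int.floordiv_eq_ediv_of_pos (by omega)
  have hmod : PySem.Int.mod rc parts = rc % parts :=
    PySem.Int.mod_eq_emod_of_pos (by omega)
  have hm0 : 0 ≤ rc % parts := Int.emod_nonneg rc (by omega)
  have hmlt : rc % parts < parts := Int.emod_lt_of_pos rc (by omega)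
  rw [pvGreedy_blocks parts.toNat rc parts (rc / parts) (rc % parts) [] (by omega) hp hm0 hmlt
      (by have := Int.emod_add_ediv rc parts; linarith)]
  rw [hdiv, hmod, PySem.List.pyRange_one]
  simp only [sub_zero, List.map_map, List.nil_append]
  have hcomp : ((fun i => rc / parts + (if i < rc % parts then 1 else 0)) ∘ fun k : Nat => (0 : Int) + k)
      = fun k : Nat => if k < (rc % parts).toNat then rc / parts + 1 else rc / parts := by
    funext k
    by_cases hk : (k : Int) < rc % parts
    · have : k < (rc % parts).toNat := by omega
      simp [Function.comp, hk, this]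
    · have : ¬ k < (rc % parts).toNat := by omega
      simp [Function.comp, hk, this]
  rw [hcomp, range_map_ite_split _ _ _ _ (by omega)]
  congr 2
  omega
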